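-- pv_equiv track=rewrite | github.com/picasso653/codesignal_-codes | Intro Data Structures & Algorithms/stacks/smaller_preceeding_numbers.py | findSmallerPreceeding
-- ===== SOURCE A (Python) =====
-- def findSmallerPreceeding(numbers):
--     result = [-1]
--     stack = []
--     for num in numbers:
--         while stack and stack[-1] >= num:
--             stack.pop()
--         result.append(stack[-1] if stack else -1)
--         stack.append(num)
--     return result[1:]
-- ===== SOURCE B (Python) =====
-- def findSmallerPreceeding(numbers):
--     result = []
--     for i in range(len(numbers)):
--         val = -1
--         for j in range(i - 1, -1, -1):
--             if numbers[j] < numbers[i]: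
--                 val = numbers[j]
--                 break
--         result.append(val)
--     return result
-- ===== Notes on version B (the rewrite author's own statement) =====
-- stated objective: simpler
-- what changed: Replaced the monotonic stack with a direct backward scan per element: for each index, scan the preceding elements from right to left and take the first one strictly smaller, -1 if none; no stack is maintained.
import Mathlib
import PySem

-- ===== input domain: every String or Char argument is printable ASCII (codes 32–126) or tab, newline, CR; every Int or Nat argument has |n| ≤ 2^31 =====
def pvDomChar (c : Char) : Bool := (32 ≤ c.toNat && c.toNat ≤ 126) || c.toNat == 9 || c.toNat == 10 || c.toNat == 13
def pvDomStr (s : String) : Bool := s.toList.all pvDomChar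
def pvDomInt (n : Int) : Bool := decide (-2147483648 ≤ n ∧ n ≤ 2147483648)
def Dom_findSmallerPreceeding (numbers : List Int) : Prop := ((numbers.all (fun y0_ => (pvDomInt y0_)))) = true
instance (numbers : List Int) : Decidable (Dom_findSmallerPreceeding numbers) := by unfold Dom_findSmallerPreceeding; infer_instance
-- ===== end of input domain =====

-- ===== PORT A =====
-- B replaces A's monotonic stack with a direct backward scan per element (simpler, same return values).

-- Python 'while stack and stack[-1] >= num: stack.pop()' (stack top = list head here)
def popGE (num : Int) : List Int → List Int
  | [] => []
  | t :: s => if t ≥ num then popGE num s else t :: s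

-- the for-loop over numbers; accumulator = (result, stack)
def stepA (acc : List Int × List Int) (num : Int) : List Int × List Int :=
  let s := popGE num acc.2
  (acc.1 ++ [if s.isEmpty then -1 else s.headD (-1)], num :: s)

-- result[1:] on the always-nonempty result list is List.drop 1 (exact for index 1 ≥ 0)
def findSmallerPreceeding (numbers : List Int) : List Int :=
  (numbers.foldl stepA ([-1], [])).1.drop 1

-- ===== PORT B =====
-- the inner backward scan: first element of prev (earlier elements, most recent first) < num, else -1
def firstSmaller (num : Int) : List Int → Int
  | [] => -1
  | y :: rest => if y < num then y else firstSmaller num rest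

-- outer loop: prev holds the already-processed prefix in reverse (backward-scan order)
def goB (prev : List Int) : List Int → List Int
  | [] => []
  | num :: rest => firstSmaller num prev :: goB (num :: prev) rest

def findSmallerPreceeding_alt (numbers : List Int) : List Int := goB [] numbers

-- ===== PRECONDITION & SPEC =====
def Spec_findSmallerPreceeding (numbers : List Int) (out : List Int) : Prop := out = findSmallerPreceeding_alt numbers
instance (numbers : List Int) (out : List Int) : Decidable (Spec_findSmallerPreceeding numbers out) := by unfold Spec_findSmallerPreceeding; infer_instance

-- ===== CLAIM (what is proved, stated in full; the proofs are below) =====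
def Claim_equal_findSmallerPreceeding : Prop := ∀ (numbers : List Int), Dom_findSmallerPreceeding numbers → Spec_findSmallerPreceeding numbers (findSmallerPreceeding numbers)

-- ===== LEMMAS AND PROOFS =====

-- the invariant relating the reversed processed prefix to the stack:
-- the first strictly-smaller element (for any bound x) is found at the same value
def StackInv (prev s : List Int) : Prop := ∀ x : Int, prev.find? (· < x) = s.find? (· < x)

lemma firstSmaller_eq_find? (num : Int) (l : List Int) :
    firstSmaller num l = (l.find? (· < num)).getD (-1) := by
  induction l with
  | nil => simp [firstSmaller]
  | cons y rest ih =>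
    by_cases h : y < num
    · simp [firstSmaller, List.find?, h]
    · simp [firstSmaller, List.find?, h, ih]

lemma find?_popGE (num x : Int) (s : List Int) (hx : x ≤ num) :
    (popGE num s).find? (· < x) = s.find? (· < x) := by
  induction s with
  | nil => simp [popGE]
  | cons t rest ih =>
    by_cases h : t ≥ num
    · have : ¬ (t < x) := by omega
      simp [popGE, h, List.find?, this, ih]
    · simp [popGE, h]

lemma head_popGE (num : Int) (s : List Int) :
    (if (popGE num s).isEmpty then (-1 : Int) else (popGE num s).headD (-1))
      = ((popGE num s).find? (· < num)).getD (-1) := by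
  induction s with
  | nil => simp [popGE]
  | cons t rest ih =>
    by_cases h : t ≥ num
    · simpa [popGE, h] using ih
    · have h' : t < num := by omega
      simp [popGE, h, List.find?, h']

lemma inv_step (prev s : List Int) (num : Int) (hinv : StackInv prev s) :
    StackInv (num :: prev) (num :: popGE num s) := by
  intro x
  by_cases h : num < x
  · simp [List.find?, h]
  · have hx : x ≤ num := by omega
    simp only [List.find?, decide_eq_false h]
    rw [find?_popGE num x s hx, hinv x]

lemma foldl_stepA_eq (numbers : List Int) :
    ∀ (prev s res : List Int), StackInv prev s →
      (numbers.foldl stepA (res, s)).1 = res ++ goB prev numbers := by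
  induction numbers with
  | nil => intro prev s res _; simp [goB]
  | cons num rest ih =>
    intro prev s res hinv
    have hval : (if (popGE num s).isEmpty then (-1 : Int) else (popGE num s).headD (-1))
        = firstSmaller num prev := by
      rw [head_popGE, firstSmaller_eq_find?, hinv num, find?_popGE num num s le_rfl]
    simp only [List.foldl_cons, stepA]
    rw [hval, ih (num :: prev) (num :: popGE num s) _ (inv_step prev s num hinv)]
    simp [goB]

-- ===== VERDICT (by name: the statement is the Claim_ definition above) =====
theorem findSmallerPreceeding_spec : Claim_equal_findSmallerPreceeding := by
  intro numbers _
  show findSmallerPreceeding numbers = findSmallerPreceeding_alt numbers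
  unfold findSmallerPreceeding findSmallerPreceeding_alt
  rw [foldl_stepA_eq numbers [] [] [-1] (fun _ => rfl)]
  simp
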